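-- pv_equiv track=rewrite | github.com/kevinchau321/cs61a | hw/hw3/hw3copy.py | pingpong_iter
-- ===== SOURCE A (Python) =====
-- def has_seven(k):
--     """Has a has_seven
--     >>> has_seven(3)
--     False
--     >>> has_seven(7)
--     True
--     >>> has_seven(2734)
--     True
--     >>> has_seven(2634)
--     False
--     >>> has_seven(734)
--     True
--     >>> has_seven(7777)
--     True
--     """
--     "*** YOUR CODE HERE ***"
--     if k % 10 == 7:
--         return True
--     if k // 10 == 0 and k != 7:
--         return False
--     return has_seven(k//10)
--
-- def pingpong_iter(n):
--     """Return the nth element of the ping-pong sequence.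
--
--     >>> pingpong(7)
--     7
--     >>> pingpong(8)
--     6
--     >>> pingpong(15)
--     1
--     >>> pingpong(21)
--     -1
--     >>> pingpong(22)
--     0
--     >>> pingpong(30)
--     6
--     >>> pingpong(100)
--     2
--     """
--     def switch_direction(switch_index):
--         if (switch_index + 1) % 2 ==0:
--             return (-1)
--         return 1
--     total = 1
--     k = 1
--     switch_index = 0
--     while k < n:
--         if k % 7 == 0 or has_seven(k):
--             switch_index=switch_index + 1
--         total = total + switch_direction(switch_index)
--         k = k + 1
--     return total
-- ===== SOURCE B (Python) =====
-- def pingpong_iter(n):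
--     total = 1
--     direction = 1
--     digits = [1]
--     sevens = 0
--     kmod7 = 1
--     for _ in range(1, n):
--         if kmod7 == 0 or sevens:
--             direction = -direction
--         total += direction
--         d = digits[0]
--         if d != 9:
--             if d == 7:
--                 sevens -= 1
--             d += 1
--             if d == 7:
--                 sevens += 1
--             digits[0] = d
--         else:
--             digits[0] = 0
--             i = 1
--             while i < len(digits) and digits[i] == 9:
--                 digits[i] = 0
--                 i += 1
--             if i == len(digits):
--                 digits.append(1)
--             else:
--                 d = digits[i]
--                 if d == 7:
--                     sevens -= 1
--                 d += 1
--                 if d == 7: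
--                     sevens += 1
--                 digits[i] = d
--         kmod7 += 1
--         if kmod7 == 7:
--             kmod7 = 0
--     return total
-- ===== Notes on version B (the rewrite author's own statement) =====
-- stated objective: faster
-- what changed: Instead of re-deriving the digits of k at every step (recursive has_seven) and recomputing the direction from a parity counter, B walks k once maintaining an incrementally updated little-endian digit list of k with a running count of seven-digits, a running remainder of k modulo seven, and the direction itself, so each step is amortized constant time.
import Mathlib
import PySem

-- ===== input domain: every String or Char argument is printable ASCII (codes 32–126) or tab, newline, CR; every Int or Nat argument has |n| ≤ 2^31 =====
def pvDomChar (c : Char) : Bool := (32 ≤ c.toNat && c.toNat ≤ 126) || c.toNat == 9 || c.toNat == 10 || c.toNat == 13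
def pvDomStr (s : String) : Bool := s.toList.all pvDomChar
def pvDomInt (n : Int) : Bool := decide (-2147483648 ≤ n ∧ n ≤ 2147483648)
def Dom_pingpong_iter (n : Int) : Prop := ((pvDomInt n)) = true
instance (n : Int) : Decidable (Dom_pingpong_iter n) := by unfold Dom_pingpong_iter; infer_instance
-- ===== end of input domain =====

-- B replaces A's per-step digit re-scan (recursive has_seven) and parity counter by an incrementally
-- maintained digit list, count of seven-digits, running remainder and direction (objective: faster).

-- ===== PORT A =====
-- has_seven, with a fuel argument for Lean totality; fuel (k.toNat + 1) exceeds the recursion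
-- depth for every k ≥ 1, which is the only way the loop below calls it.
def has_sevenF : Nat → Int → Bool
  | 0, _ => false
  | fuel+1, k =>
    if PySem.Int.mod k 10 = 7 then true
    else if PySem.Int.floordiv k 10 = 0 ∧ k ≠ 7 then false
    else has_sevenF fuel (PySem.Int.floordiv k 10)

def has_seven (k : Int) : Bool := has_sevenF (k.toNat + 1) k

def switch_direction (switch_index : Int) : Int :=
  if PySem.Int.mod (switch_index + 1) 2 = 0 then -1 else 1

-- the while-loop of A; fuel (n-1).toNat is the exact trip count
def pingLoopA : Nat → Int → Int → Int → Int → Int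
  | 0, total, _, _, _ => total
  | fuel+1, total, k, switch_index, n =>
    if k < n then
      let si := if PySem.Int.mod k 7 = 0 ∨ has_seven k = true then switch_index + 1 else switch_index
      pingLoopA fuel (total + switch_direction si) (k + 1) si n
    else total

def pingpong_iter (n : Int) : Int := pingLoopA (n - 1).toNat 1 1 0 n

-- ===== PORT B =====
-- B's in-place increment of the little-endian digit list, as structural recursion on the
-- prefix it touches: bump a non-9 digit (adjusting the 7-digit count), turn a 9 into 0 and
-- carry into the rest, append 1 if every digit was 9.
def carryInc (digits : List Int) (sevens : Int) : List Int × Int :=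
  match digits with
  | [] => ([1], sevens)
  | d :: t =>
    if d ≠ 9 then
      let s1 := if d = 7 then sevens - 1 else sevens
      let s2 := if d + 1 = 7 then s1 + 1 else s1
      ((d + 1) :: t, s2)
    else
      let r := carryInc t sevens
      (0 :: r.1, r.2)

-- the for-loop of B over range(1, n): fuel = (n-1).toNat iterations;
-- state: total, direction, digit list of k, 7-count, k mod 7
def pingLoopB : Nat → Int → Int → List Int → Int → Int → Int
  | 0, total, _, _, _, _ => total
  | fuel+1, total, direction, digits, sevens, kmod7 =>
    let dir := if kmod7 = 0 ∨ sevens ≠ 0 then -direction else direction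
    let r := carryInc digits sevens
    let m := kmod7 + 1
    pingLoopB fuel (total + dir) dir r.1 r.2 (if m = 7 then 0 else m)

def pingpong_iter_alt (n : Int) : Int := pingLoopB (n - 1).toNat 1 1 [1] 0 1

-- ===== PRECONDITION & SPEC =====
def Spec_pingpong_iter (n : Int) (out : Int) : Prop := out = pingpong_iter_alt n
instance (n : Int) (out : Int) : Decidable (Spec_pingpong_iter n out) := by unfold Spec_pingpong_iter; infer_instance

-- ===== CLAIM (what is proved, stated in full; the proofs are below) =====
def Claim_equal_pingpong_iter : Prop := ∀ (n : Int), Dom_pingpong_iter n → Spec_pingpong_iter n (pingpong_iter n)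

-- ===== LEMMAS AND PROOFS =====

-- value of a little-endian digit list
def valD : List Int → Int
  | [] => 0
  | d :: t => d + 10 * valD t

-- digit-list well-formedness: digits in 0..9, most significant digit nonzero
def WValid (l : List Int) : Prop :=
  (∀ d ∈ l, 0 ≤ d ∧ d ≤ 9) ∧ (∀ x, l.getLast? = some x → x ≠ 0)

-- number of 7 digits
def cnt7 : List Int → Int
  | [] => 0
  | d :: t => (if d = 7 then 1 else 0) + cnt7 t

theorem cnt7_nonneg (l : List Int) : 0 ≤ cnt7 l := by
  induction l with
  | nil => simp [cnt7]
  | cons d t ih => simp only [cnt7]; split <;> omega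

theorem cnt7_pos_iff (l : List Int) : 0 < cnt7 l ↔ 7 ∈ l := by
  induction l with
  | nil => simp [cnt7]
  | cons d t ih =>
    have := cnt7_nonneg t
    simp only [cnt7, List.mem_cons]
    constructor
    · intro h
      by_cases hd : d = 7
      · exact Or.inl hd.symm
      · simp [hd] at h; exact Or.inr (ih.mp h)
    · rintro (hd | ht)
      · simp [hd.symm]; omega
      · have := ih.mpr ht; split <;> omega

theorem WValid_tail (d : Int) (t : List Int) (h : WValid (d :: t)) : WValid t := by
  obtain ⟨h1, h2⟩ := h
  refine ⟨fun x hx => h1 x (List.mem_cons_of_mem _ hx), fun x hx => ?_⟩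
  cases t with
  | nil => simp at hx
  | cons a s => exact h2 x (by simpa [List.getLast?_cons_cons] using hx)

theorem valD_pos (l : List Int) (hv : WValid l) (hne : l ≠ []) : 1 ≤ valD l := by
  induction l with
  | nil => exact absurd rfl hne
  | cons d t ih =>
    obtain ⟨h1, h2⟩ := hv
    have hd := h1 d (List.mem_cons_self)
    cases t with
    | nil =>
      have : d ≠ 0 := h2 d (by simp)
      simp only [valD]; omega
    | cons a s =>
      have ht : 1 ≤ valD (a :: s) := ih (WValid_tail d _ ⟨h1, h2⟩) (by simp)
      simp only [valD] at ht ⊢; omega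

theorem mod10_val (d v : Int) (h0 : 0 ≤ d) (h9 : d ≤ 9) :
    PySem.Int.mod (d + 10 * v) 10 = d := by
  rw [PySem.Int.mod_eq_emod_of_pos (by norm_num)]
  omega

theorem floordiv10_val (d v : Int) (h0 : 0 ≤ d) (h9 : d ≤ 9) :
    PySem.Int.floordiv (d + 10 * v) 10 = v := by
  rw [PySem.Int.floordiv_eq_iff_of_pos (by norm_num)]
  omega

-- has_sevenF on the value of a digit list decides membership of 7, given enough fuel
theorem has_sevenF_val (fuel : Nat) :
    ∀ l, l.length ≤ fuel → WValid l → l ≠ [] →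
      has_sevenF fuel (valD l) = decide (7 ∈ l) := by
  induction fuel with
  | zero => intro l hl _ hne; cases l with
    | nil => exact absurd rfl hne
    | cons d t => simp at hl
  | succ fuel ih =>
    intro l hl hv hne
    cases l with
    | nil => exact absurd rfl hne
    | cons d t =>
      have hd := hv.1 d (List.mem_cons_self)
      have hmod : PySem.Int.mod (valD (d :: t)) 10 = d := by
        simpa [valD] using mod10_val d (valD t) hd.1 hd.2
      have hdiv : PySem.Int.floordiv (valD (d :: t)) 10 = valD t := by
        simpa [valD] using floordiv10_val d (valD t) hd.1 hd.2
      by_cases h7 : d = 7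
      · subst h7
        simp only [has_sevenF]
        rw [if_pos hmod]
        simp
      · cases t with
        | nil =>
          have hx : valD ([d] : List Int) = d := by simp [valD]
          simp only [has_sevenF]
          rw [if_neg (fun h => h7 (hmod.symm.trans h)),
            if_pos ⟨hdiv.trans rfl, by rw [hx]; exact h7⟩]
          simp [Ne.symm h7]
        | cons a s =>
          have hts : valD (a :: s) ≥ 1 := valD_pos _ (WValid_tail d _ hv) (by simp)
          have hrec := ih (a :: s) (by simpa using Nat.le_of_succ_le_succ hl)
            (WValid_tail d _ hv) (by simp)
          simp only [has_sevenF]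
          rw [if_neg (fun h => h7 (hmod.symm.trans h)),
            if_neg (by rw [hdiv]; rintro ⟨h, _⟩; omega), hdiv, hrec]
          simp [List.mem_cons, Ne.symm h7]

theorem length_le_val (l : List Int) (hv : WValid l) :
    l.length ≤ (valD l).toNat + 1 := by
  induction l with
  | nil => simp
  | cons d t ih =>
    have hd := hv.1 d (List.mem_cons_self)
    cases t with
    | nil => simp [valD]
    | cons a s =>
      have hvt := WValid_tail d _ hv
      have h1 := valD_pos (a :: s) hvt (by simp)
      have h2 := ih hvt
      simp only [List.length_cons, valD] at h1 h2 ⊢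
      omega

theorem has_seven_val (l : List Int) (hv : WValid l) (hne : l ≠ []) :
    has_seven (valD l) = decide (7 ∈ l) := by
  have h1 : 1 ≤ valD l := valD_pos l hv hne
  have h2 := length_le_val l hv
  exact has_sevenF_val _ l (by omega) hv hne

-- carryInc is the successor on digit lists and tracks the 7-count exactly
theorem carryInc_spec (l : List Int) (s : Int) (hv : WValid l) :
    (carryInc l s).1 ≠ [] ∧ WValid (carryInc l s).1 ∧
    valD (carryInc l s).1 = valD l + 1 ∧
    (s = cnt7 l → (carryInc l s).2 = cnt7 (carryInc l s).1) := by
  induction l generalizing s with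
  | nil =>
    refine ⟨by simp [carryInc], ⟨?_, ?_⟩, by simp [carryInc, valD], ?_⟩
    · intro x hx; simp [carryInc] at hx; omega
    · intro x hx; simp [carryInc] at hx; omega
    · intro hs; simp [carryInc, cnt7] at hs ⊢; omega
  | cons d t ih =>
    have hd := hv.1 d (List.mem_cons_self)
    by_cases h9 : d = 9
    · subst h9
      obtain ⟨ine, ⟨iv1, iv2⟩, ival, icnt⟩ := ih s (WValid_tail 9 _ hv)
      have hred : carryInc (9 :: t) s = (0 :: (carryInc t s).1, (carryInc t s).2) := by
        simp [carryInc]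
      rw [hred]
      refine ⟨by simp, ⟨?_, ?_⟩, ?_, ?_⟩
      · intro x hx
        simp only [List.mem_cons] at hx
        rcases hx with rfl | hx
        · omega
        · exact iv1 x hx
      · intro x hx
        cases hr : (carryInc t s).1 with
        | nil => exact absurd hr ine
        | cons b u =>
          rw [hr, List.getLast?_cons_cons] at hx
          exact iv2 x (by rw [hr]; exact hx)
      · simp only [valD, ival]; omega
      · intro hs
        simp only [cnt7] at hs
        have h2 := icnt (by omega)
        simp only [cnt7, h2]
        norm_num
    · have hred : carryInc (d :: t) s =
          ((d + 1) :: t, if d + 1 = 7 then (if d = 7 then s - 1 else s) + 1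
            else (if d = 7 then s - 1 else s)) := by
        simp [carryInc, h9]
      rw [hred]
      refine ⟨by simp, ⟨?_, ?_⟩, ?_, ?_⟩
      · intro x hx
        simp only [List.mem_cons] at hx
        rcases hx with rfl | hx
        · omega
        · exact hv.1 x (List.mem_cons_of_mem _ hx)
      · intro x hx
        cases t with
        | nil => simp at hx; omega
        | cons a u =>
          rw [List.getLast?_cons_cons] at hx
          exact hv.2 x (by rw [List.getLast?_cons_cons]; exact hx)
      · simp only [valD]; omega
      · intro hs
        simp only [cnt7] at hs ⊢
        split_ifs <;> omega

theorem switch_flip (si : Int) : switch_direction (si + 1) = - switch_direction si := by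
  unfold switch_direction
  rw [PySem.Int.mod_eq_emod_of_pos (by norm_num), PySem.Int.mod_eq_emod_of_pos (by norm_num)]
  split_ifs <;> omega

theorem mod7_step (k : Int) :
    (if PySem.Int.mod k 7 + 1 = 7 then (0 : Int) else PySem.Int.mod k 7 + 1) =
      PySem.Int.mod (k + 1) 7 := by
  rw [PySem.Int.mod_eq_emod_of_pos (by norm_num), PySem.Int.mod_eq_emod_of_pos (by norm_num)]
  split_ifs <;> omega

theorem loop_eq (fuel : Nat) :
    ∀ (total k si sevens n : Int) (l : List Int),
      1 ≤ k → fuel = (n - k).toNat → WValid l → l ≠ [] → valD l = k → sevens = cnt7 l →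
      pingLoopA fuel total k si n =
        pingLoopB fuel total (switch_direction si) l sevens (PySem.Int.mod k 7) := by
  induction fuel with
  | zero => intro _ _ _ _ _ _ _ _ _ _ _ _; rfl
  | succ fuel ih =>
    intro total k si sevens n l hk hfuel hv hne hval hcnt
    have hkn : k < n := by omega
    have hcnt7 := cnt7_nonneg l
    simp only [pingLoopA, pingLoopB, if_pos hkn]
    have hcond : (PySem.Int.mod k 7 = 0 ∨ has_seven k = true) ↔
        (PySem.Int.mod k 7 = 0 ∨ sevens ≠ 0) := by
      have h7 : has_seven k = decide (7 ∈ l) := hval ▸ has_seven_val l hv hne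
      constructor
      · rintro (h | h)
        · exact Or.inl h
        · right; rw [h7, decide_eq_true_iff] at h
          have := (cnt7_pos_iff l).mpr h; omega
      · rintro (h | h)
        · exact Or.inl h
        · right; rw [h7, decide_eq_true_iff]
          exact (cnt7_pos_iff l).mp (by omega)
    obtain ⟨ine, iv, ival, icnt⟩ := carryInc_spec l sevens hv
    have hic := icnt hcnt
    by_cases hc : PySem.Int.mod k 7 = 0 ∨ has_seven k = true
    · rw [if_pos hc, if_pos (hcond.mp hc), ← switch_flip si, mod7_step k]
      exact ih _ _ _ _ _ _ (by omega) (by omega) iv ine (by omega) hic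
    · rw [if_neg hc, if_neg (fun h => hc (hcond.mpr h)), mod7_step k]
      exact ih _ _ _ _ _ _ (by omega) (by omega) iv ine (by omega) hic

-- ===== VERDICT (by name: the statement is the Claim_ definition above) =====
theorem pingpong_iter_spec : Claim_equal_pingpong_iter := by
  intro n _
  unfold Spec_pingpong_iter pingpong_iter pingpong_iter_alt
  have h := loop_eq (n - 1).toNat 1 1 0 0 n [1] (by norm_num) rfl
    ⟨by intro d hd; simp at hd; omega, by intro x hx; simp at hx; omega⟩
    (by simp) (by simp [valD]) (by simp [cnt7])
  have h1 : switch_direction 0 = 1 := by decide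
  have h2 : PySem.Int.mod 1 7 = 1 := by decide
  rw [h, h1, h2]
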